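-- pv_equiv track=rewrite | github.com/SOM-Research/sample-creator | sample-creator/Categorical_Stratification.py | classify_observations2
-- ===== SOURCE A (Python) =====
-- def classify_observations2(observations, combination_strata):
--     """
--     Classify observations into strata based on provided combinations, ignoring the first variable (assumed to be the name).
--
--     Args:
--     - observations (list): A list of observations where each observation is a list.
--     - combination_strata (list): A list of lists containing combinations.
--
--     Returns:
--     - dict: A dictionary where each key is a stratum (as a tuple) and each value is a list of observations.
--     """
--     # Initialize the dictionary with the combination keys
--     classified_observations = {tuple(comb): [] for comb in combination_strata}
--
--     # Iterate over each observation
--     for obs in observations: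
--         # Extract the variables (excluding the name)
--         obs_variables = obs[1:]
--         # Iterate over each combination to classify the observation
--         for comb in combination_strata:
--             if obs_variables == comb:
--                 key = tuple(comb)
--                 classified_observations[key].append(obs)
--                 break  # Stop checking once the observation is classified
--
--     return classified_observations
-- ===== SOURCE B (Python) =====
-- def classify_observations2(observations, combination_strata):
--     """Two staged passes: first group ALL observations by their variable tuple,
--     then assemble the result by looking each combination's bucket up."""
--     groups = {}
--     for obs in observations:
--         groups.setdefault(tuple(obs[1:]), []).append(obs)
--     result = {}
--     for comb in combination_strata:
--         key = tuple(comb)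
--         result[key] = list(groups.get(key, []))
--     return result
-- ===== Notes on version B (the rewrite author's own statement) =====
-- stated objective: alternative
-- what changed: B uses a two-stage group-then-assemble algorithm: it first groups ALL observations into buckets keyed by their variable tuple (setdefault/append), then builds the result dict afresh by iterating combination_strata and copying each combination's bucket; A instead pre-initializes the result and scans the combination list per observation with a break.
import Mathlib
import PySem

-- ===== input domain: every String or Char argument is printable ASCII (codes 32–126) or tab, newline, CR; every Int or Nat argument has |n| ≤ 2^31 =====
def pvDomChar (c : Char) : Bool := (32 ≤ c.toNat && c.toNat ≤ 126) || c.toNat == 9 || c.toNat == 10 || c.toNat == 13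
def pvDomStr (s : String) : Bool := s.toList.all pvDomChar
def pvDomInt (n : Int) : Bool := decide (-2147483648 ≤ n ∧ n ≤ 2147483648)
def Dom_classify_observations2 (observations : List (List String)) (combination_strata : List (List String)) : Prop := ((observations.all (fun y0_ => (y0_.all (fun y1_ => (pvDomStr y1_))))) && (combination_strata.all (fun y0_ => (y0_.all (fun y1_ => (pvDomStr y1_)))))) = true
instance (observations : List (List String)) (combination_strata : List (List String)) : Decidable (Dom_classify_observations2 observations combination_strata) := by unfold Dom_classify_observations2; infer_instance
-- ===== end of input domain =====

-- B groups all observations into buckets first and then assembles the result per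
-- combination, instead of A's per-observation scan over the combination list
-- (objective: alternative two-stage algorithm).

-- ===== PORT A =====
-- {tuple(comb): [] for comb in combination_strata}
def pvInitDict (combination_strata : List (List String)) : PySem.Dict (List String) (List (List String)) :=
  combination_strata.foldl (fun d comb => d.insert comb ([] : List (List String))) PySem.Dict.empty

-- A's inner 'for comb in combination_strata: if obs_variables == comb: …; break'.
-- classified_observations[key].append(obs): the key is always present here (it was
-- initialized from the same list), so Dict.modify with default [] is exact.
def pvAInner (combs : List (List String)) (ov : List String) (obs : List String)
    (d : PySem.Dict (List String) (List (List String))) : PySem.Dict (List String) (List (List String)) :=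
  match combs with
  | [] => d
  | c :: cs => if ov = c then d.modify c [] (fun l => l ++ [obs]) else pvAInner cs ov obs d

def classify_observations2 (observations : List (List String)) (combination_strata : List (List String)) : List (List String × List (List String)) :=
  (observations.foldl
      (fun d obs => pvAInner combination_strata (PySem.List.slice obs (some 1) none) obs d)
      (pvInitDict combination_strata)).items

-- ===== PORT B =====
-- stage 1: groups.setdefault(tuple(obs[1:]), []).append(obs)  =  modify with default []
def pvGroups (observations : List (List String)) : PySem.Dict (List String) (List (List String)) :=
  observations.foldl
    (fun g obs => g.modify (PySem.List.slice obs (some 1) none) [] (fun l => l ++ [obs]))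
    PySem.Dict.empty

-- stage 2: result[key] = list(groups.get(key, []))
def classify_observations2_alt (observations : List (List String)) (combination_strata : List (List String)) : List (List String × List (List String)) :=
  let groups := pvGroups observations
  (combination_strata.foldl (fun r comb => r.insert comb (groups.getD comb [])) PySem.Dict.empty).items

-- ===== PRECONDITION & SPEC =====
def Spec_classify_observations2 (observations : List (List String)) (combination_strata : List (List String)) (out : List (List String × List (List String))) : Prop := out = classify_observations2_alt observations combination_strata
instance (observations : List (List String)) (combination_strata : List (List String)) (out : List (List String × List (List String))) : Decidable (Spec_classify_observations2 observations combination_strata out) := by unfold Spec_classify_observations2; infer_instance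

-- ===== CLAIM (what is proved, stated in full; the proofs are below) =====
def Claim_equal_classify_observations2 : Prop := ∀ (observations : List (List String)) (combination_strata : List (List String)), Dom_classify_observations2 observations combination_strata → Spec_classify_observations2 observations combination_strata (classify_observations2 observations combination_strata)

-- ===== LEMMAS AND PROOFS =====

-- A's inner scan appends obs at key ov exactly when ov occurs in combs.
theorem pvAInner_eq (combs : List (List String)) (ov obs : List String)
    (d : PySem.Dict (List String) (List (List String))) :
    pvAInner combs ov obs d =
      if ov ∈ combs then d.modify ov [] (fun l => l ++ [obs]) else d := by
  induction combs with
  | nil => simp [pvAInner]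
  | cons c cs ih =>
    by_cases h : ov = c
    · subst h; simp [pvAInner]
    · simp [pvAInner, h, ih]

-- the grouping dict's bucket at k is the observations whose tail equals k, in order
theorem pvGroups_getD (observations : List (List String)) (k : List String) :
    (pvGroups observations).getD k [] =
      observations.filter (fun o => PySem.List.slice o (some 1) none == k) := by
  unfold pvGroups
  rw [show (observations.foldl
        (fun g obs => g.modify (PySem.List.slice obs (some 1) none) [] (fun l => l ++ [obs]))
        PySem.Dict.empty)
      = ((observations.map (fun o => (PySem.List.slice o (some 1) none, o))).foldl
          (fun d p => d.modify p.1 [] (fun l => l ++ [p.2])) PySem.Dict.empty) from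
      (List.foldl_map (f := fun o : List String => (PySem.List.slice o (some 1) none, o))
        (g := fun (d : PySem.Dict (List String) (List (List String))) p =>
          d.modify p.1 [] (fun l => l ++ [p.2]))).symm]
  rw [PySem.Dict.getD_foldl_modify_append]
  simp [List.filter_map, Function.comp_def, List.map_map]

-- a fold of inserts whose value depends only on the key: last write wins, same value
theorem pvFoldInsert_getD (C : List (List String)) (v : List String → List (List String))
    (d : PySem.Dict (List String) (List (List String))) (k : List String) :
    (C.foldl (fun r c => r.insert c (v c)) d).getD k [] =
      if k ∈ C then v k else d.getD k [] := by
  induction C generalizing d with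
  | nil => simp
  | cons c cs ih =>
    rw [List.foldl_cons, ih]
    by_cases hm : k ∈ cs
    · simp [hm]
    · by_cases he : k = c
      · subst he; simp [hm]
      · simp [hm, he, PySem.Dict.getD_insert]

-- a fold of inserts whose value depends only on the key has keys = set(C) past d.keys
theorem pvFoldInsert_keys (C : List (List String)) (v : List String → List (List String))
    (d : PySem.Dict (List String) (List (List String))) :
    (C.foldl (fun r c => r.insert c (v c)) d).keys = PySem.Set.update d.keys C :=
  PySem.Dict.keys_foldl_insert C (fun _ c => v c) d

-- A's observation loop never changes the key list (every modify hits an existing key)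
theorem pvAFold_keys (C observations : List (List String))
    (d : PySem.Dict (List String) (List (List String)))
    (hC : ∀ c ∈ C, c ∈ d.keys) :
    (observations.foldl
        (fun d obs => pvAInner C (PySem.List.slice obs (some 1) none) obs d) d).keys = d.keys := by
  induction observations generalizing d with
  | nil => rfl
  | cons o os ih =>
    rw [List.foldl_cons, pvAInner_eq]
    by_cases h : PySem.List.slice o (some 1) none ∈ C
    · have hk : d.contains (PySem.List.slice o (some 1) none) = true := by
        rw [PySem.Dict.contains_iff_mem_keys]; exact hC _ h
      have hkeys : (d.modify (PySem.List.slice o (some 1) none) []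
          (fun l => l ++ [o])).keys = d.keys := by
        rw [PySem.Dict.keys_modify, PySem.Dict.keys_insert_of_contains _ _ hk]
      simp only [h, if_true]
      rw [ih _ (by rw [hkeys]; exact hC), hkeys]
    · simp only [h, if_false]
      exact ih _ hC
  -- (statement of keys_modify assumed: checked below)

-- A's loop bucket value at a key k ∈ C: appended observations whose tail is k, in order
theorem pvAFold_getD (C observations : List (List String))
    (d : PySem.Dict (List String) (List (List String))) (k : List String) (hk : k ∈ C) :
    (observations.foldl
        (fun d obs => pvAInner C (PySem.List.slice obs (some 1) none) obs d) d).getD k [] =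
      d.getD k [] ++ observations.filter (fun o => PySem.List.slice o (some 1) none == k) := by
  induction observations generalizing d with
  | nil => simp
  | cons o os ih =>
    rw [List.foldl_cons, pvAInner_eq]
    by_cases h : PySem.List.slice o (some 1) none ∈ C
    · rw [if_pos h, ih]
      by_cases he : PySem.List.slice o (some 1) none = k
      · rw [PySem.Dict.getD_modify]
        simp [he]
      · rw [PySem.Dict.getD_modify]
        have : ¬ (k = PySem.List.slice o (some 1) none) := fun hh => he hh.symm
        simp [this, he]
    · rw [if_neg h, ih]
      have he : PySem.List.slice o (some 1) none ≠ k := fun hh => h (hh ▸ hk)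
      simp [he]

-- the init dict {tuple(comb): []}: keys = set(C), every bucket []
theorem pvInitDict_keys (C : List (List String)) :
    (pvInitDict C).keys = PySem.Set.ofList C := by
  unfold pvInitDict
  rw [pvFoldInsert_keys C (fun _ => []), PySem.Dict.keys_empty, PySem.Set.update_nil_left]

theorem pvInitDict_getD (C : List (List String)) (k : List String) :
    (pvInitDict C).getD k [] = [] := by
  unfold pvInitDict
  rw [pvFoldInsert_getD C (fun _ => [])]
  simp

-- ===== VERDICT (by name: the statement is the Claim_ definition above) =====
theorem classify_observations2_spec : Claim_equal_classify_observations2 := by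
  intro observations C _
  unfold Spec_classify_observations2 classify_observations2 classify_observations2_alt
  have hAkeys : (observations.foldl
      (fun d obs => pvAInner C (PySem.List.slice obs (some 1) none) obs d)
      (pvInitDict C)).keys = PySem.Set.ofList C := by
    rw [pvAFold_keys]
    · exact pvInitDict_keys C
    · intro c hc
      rw [pvInitDict_keys]
      exact (PySem.Set.mem_ofList _ _).mpr hc
  have hBkeys : (C.foldl (fun r comb => r.insert comb ((pvGroups observations).getD comb []))
      PySem.Dict.empty).keys = PySem.Set.ofList C := by
    rw [pvFoldInsert_keys C (fun c => (pvGroups observations).getD c []),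
      PySem.Dict.keys_empty, PySem.Set.update_nil_left]
  rw [PySem.Dict.items_eq_map_keys _ (by rw [hAkeys]; exact PySem.Set.nodup_ofList C) [],
      PySem.Dict.items_eq_map_keys _ (by rw [hBkeys]; exact PySem.Set.nodup_ofList C) [],
      hAkeys, hBkeys]
  refine List.map_congr_left ?_
  intro k hk
  have hkC : k ∈ C := (PySem.Set.mem_ofList _ _).mp hk
  rw [pvAFold_getD C observations (pvInitDict C) k hkC, pvInitDict_getD,
      pvFoldInsert_getD C (fun c => (pvGroups observations).getD c []), if_pos hkC,
      pvGroups_getD]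
  simp
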